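-- pv_equiv track=rewrite | github.com/jayalane/homework | 5.5/coins.py | _coins_list_to_string
-- ===== SOURCE A (Python) =====
-- def _coins_list_to_string(coins_list):
--     result = []
--     for coin, number in coins_list:
--         if number == 0:
--             continue
--         if number > 1:
--             if coin[-1] == 'y':
--                 coin_string = coin[:-1] + 'ies'
--             else:
--                 coin_string = coin + 's'
--         elif number > 0:
--             coin_string = coin
--         result.append(str(number) + " " + coin_string)
--     res = ", ".join(result)
--     res = ", and ".join(res.rsplit(", ", 1))
--     if len(result) == 2:
--         res = res.replace(',', '')
--     return res
-- ===== SOURCE B (Python) =====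
-- def _plural(coin):
--     if coin.endswith('y'):
--         return coin[:-1] + 'ies'
--     return coin + 's'
--
--
-- def _coins_list_to_string(coins_list):
--     parts = []
--     word = None
--     for coin, number in coins_list:
--         if number == 0:
--             continue
--         if number > 1:
--             word = _plural(coin)
--         elif number > 0:
--             word = coin
--         parts.append(str(number) + ' ' + word)
--     if len(parts) == 0:
--         return ''
--     if len(parts) == 1:
--         return parts[0]
--     if len(parts) == 2:
--         return parts[0] + ' and ' + parts[1]
--     return ', '.join(parts[:-1]) + ', and ' + parts[-1]
-- ===== Notes on version B (the rewrite author's own statement) =====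
-- stated objective: idiomatic
-- what changed: The per-coin loop is kept (including the no-else pluralization so stale coin_string reuse on negative counts is preserved), but the rsplit/replace string-surgery assembly is replaced by an explicit length-based join: '' / parts[0] / 'X and Y' / ', '.join(...) + ', and ' + last.
-- intended difference: On inputs where a comma(-space) inside a coin name reaches the joined output (', ' in the only or last item's source coin, or any ',' in either source coin when exactly two items print), A's rsplit/replace surgery mangles names — it inserts 'and ' inside a name or deletes commas from names (A: '2 a, and bs') — while B joins the parts intact ('2 a, bs'), which is the intended formatting. — e.g. on _coins_list_to_string([("a, b", 2)]): A returns "2 a, and bs", B returns "2 a, bs"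
import Mathlib
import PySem

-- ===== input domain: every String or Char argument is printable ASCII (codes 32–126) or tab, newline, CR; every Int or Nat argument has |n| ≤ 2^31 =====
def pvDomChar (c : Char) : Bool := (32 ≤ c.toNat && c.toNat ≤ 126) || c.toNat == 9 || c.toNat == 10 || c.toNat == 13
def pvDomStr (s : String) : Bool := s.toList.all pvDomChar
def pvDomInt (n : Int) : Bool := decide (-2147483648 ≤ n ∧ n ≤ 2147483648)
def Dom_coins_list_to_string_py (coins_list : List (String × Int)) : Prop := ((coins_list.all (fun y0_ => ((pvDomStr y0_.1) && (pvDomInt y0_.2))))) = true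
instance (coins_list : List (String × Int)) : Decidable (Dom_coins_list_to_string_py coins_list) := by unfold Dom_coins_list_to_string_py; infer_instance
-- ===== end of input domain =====

-- B keeps A's per-coin loop (including the stale coin_string reuse on negative counts)
-- but replaces the rsplit/replace string surgery by an explicit length-based join;
-- on inputs where a coin name's comma reaches the output the two differ (see D_ below).

-- ===== PORT A =====
-- coin[:-1] + 'ies' if coin[-1] == 'y' else coin + 's' (the pyGet? check is the
-- coin[-1] read; its IndexError on coin = "" is excluded by Pre_).
def pvPluralA (c : List Char) : List Char :=
  if PySem.List.pyGet? c (-1) = some 'y' then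
    PySem.List.slice c none (some (-1)) ++ ['i', 'e', 's']
  else c ++ ['s']

-- one iteration of A's for-loop; state = (result, coin_string); coin_string = [] plays
-- "unbound" (a read of the unbound value is A's UnboundLocalError, excluded by Pre_).
def pvStepA (st : List (List Char) × List Char) (p : String × Int) :
    List (List Char) × List Char :=
  if p.2 = 0 then st
  else
    let cs := if p.2 > 1 then pvPluralA p.1.toList
              else if p.2 > 0 then p.1.toList else st.2
    (st.1 ++ [PySem.Int.toChars p.2 ++ ' ' :: cs], cs)

-- hand port of the scan res.rsplit(", ", 1) performs: the index of the LAST occurrence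
-- of sep in s (exact for nonempty sep, the only way A calls it).
def pvFindLast : List Char → List Char → Option Nat
  | [], _ => none
  | c :: t, sep =>
    match pvFindLast t sep with
    | some i => some (i + 1)
    | none => if sep.isPrefixOf (c :: t) then some 0 else none

-- s.rsplit(sep, 1) for nonempty sep: split at the last occurrence, if any (exact there).
def pvRsplitOne (s sep : List Char) : List (List Char) :=
  match pvFindLast s sep with
  | none => [s]
  | some i => [s.take i, s.drop (i + sep.length)]

def coins_list_to_string_py (coins_list : List (String × Int)) : String :=
  let result := (coins_list.foldl pvStepA ([], [])).1
  let res := PySem.Chars.join [',', ' '] result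
  let res := PySem.Chars.join [',', ' ', 'a', 'n', 'd', ' '] (pvRsplitOne res [',', ' '])
  let res := if result.length = 2 then PySem.Chars.replace res [','] [] else res
  String.ofList res

-- ===== PORT B =====
-- coin[:-1] + 'ies' if coin.endswith('y') else coin + 's'
def pvPluralB (c : List Char) : List Char :=
  if PySem.Chars.endswith c ['y'] then
    PySem.List.slice c none (some (-1)) ++ ['i', 'e', 's']
  else c ++ ['s']

-- one iteration of B's loop; word = none is Python's word = None (the .getD [] read of
-- none is Python B's TypeError on str + None, excluded by Pre_).
def pvStepB (st : List (List Char) × Option (List Char)) (p : String × Int) :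
    List (List Char) × Option (List Char) :=
  if p.2 = 0 then st
  else
    let w := if p.2 > 1 then some (pvPluralB p.1.toList)
             else if p.2 > 0 then some p.1.toList else st.2
    (st.1 ++ [PySem.Int.toChars p.2 ++ ' ' :: w.getD []], w)

def coins_list_to_string_py_alt (coins_list : List (String × Int)) : String :=
  let parts := (coins_list.foldl pvStepB ([], none)).1
  if parts.length = 0 then String.ofList []
  else if parts.length = 1 then String.ofList (parts.getD 0 [])
  else if parts.length = 2 then
    String.ofList (parts.getD 0 [] ++ [' ', 'a', 'n', 'd', ' '] ++ parts.getD 1 [])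
  else
    String.ofList (PySem.Chars.join [',', ' '] parts.dropLast ++
      [',', ' ', 'a', 'n', 'd', ' '] ++ parts.getLastD [])

-- ===== PRECONDITION & SPEC =====
-- Pre_ excludes exactly the inputs where Python A raises: a coin "" with count > 1
-- (IndexError on coin[-1]) and a negative count with no earlier count ≥ 1
-- (UnboundLocalError on coin_string).
def Pre_coins_list_to_string_py (coins_list : List (String × Int)) : Prop :=
  ∀ i < coins_list.length,
    ((coins_list.getD i ("", 0)).2 > 1 → (coins_list.getD i ("", 0)).1 ≠ "") ∧
    ((coins_list.getD i ("", 0)).2 < 0 → ∃ j < i, (coins_list.getD j ("", 0)).2 ≥ 1)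
instance (coins_list : List (String × Int)) : Decidable (Pre_coins_list_to_string_py coins_list) := by unfold Pre_coins_list_to_string_py; infer_instance
def pvWitness_coins_list_to_string_py : (List (String × Int)) := [("penny", 2), ("dime", 1)]

-- the source coin of each printed item: its own coin for count ≥ 1, the most recent
-- coin with count ≥ 1 for a negative count (A's stale coin_string; "" if none).
def pvWords : String → List (String × Int) → List String
  | _, [] => []
  | cur, p :: t =>
    if p.2 = 0 then pvWords cur t
    else if p.2 ≥ 1 then p.1 :: pvWords p.1 t
    else cur :: pvWords cur t

-- does a comma of a source coin reach the joined output?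
def pvCommaShows : List String → Bool
  | [] => false
  | [s, t] => PySem.Str.isIn "," s || PySem.Str.isIn "," t
  | ss => PySem.Str.isIn ", " (ss.getLastD "")

-- On inputs where a comma inside a source coin name reaches the joined output (", " in
-- the only or in the last printed item's source coin, or any "," in a source coin when
-- exactly two items print), A's rsplit/replace surgery mangles the names (it inserts
-- "and " inside a name, or deletes commas from names: A gives "2 a, and bs"), while B
-- joins the parts intact ("2 a, bs"), which is the intended formatting.
def D_coins_list_to_string_py (coins_list : List (String × Int)) : Prop :=
  pvCommaShows (pvWords "" coins_list) = true
instance (coins_list : List (String × Int)) : Decidable (D_coins_list_to_string_py coins_list) := by unfold D_coins_list_to_string_py; infer_instance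

def Spec_coins_list_to_string_py (coins_list : List (String × Int)) (out : String) : Prop := ¬ D_coins_list_to_string_py coins_list → out = coins_list_to_string_py_alt coins_list
instance (coins_list : List (String × Int)) (out : String) : Decidable (Spec_coins_list_to_string_py coins_list out) := by unfold Spec_coins_list_to_string_py; infer_instance

def pvDiffWitness_coins_list_to_string_py : (List (String × Int)) := [("a, b", 2)]
def pvDiffWitnessOut_coins_list_to_string_py : String × String := ("2 a, and bs", "2 a, bs")

-- ===== CLAIM (what is proved, stated in full; the proofs are below) =====
def Claim_unchanged_coins_list_to_string_py : Prop := ∀ (coins_list : List (String × Int)), Dom_coins_list_to_string_py coins_list → Pre_coins_list_to_string_py coins_list → Spec_coins_list_to_string_py coins_list (coins_list_to_string_py coins_list)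
def Claim_changed_coins_list_to_string_py : Prop := Dom_coins_list_to_string_py (pvDiffWitness_coins_list_to_string_py) ∧ Pre_coins_list_to_string_py (pvDiffWitness_coins_list_to_string_py) ∧ D_coins_list_to_string_py (pvDiffWitness_coins_list_to_string_py) ∧ coins_list_to_string_py (pvDiffWitness_coins_list_to_string_py) = pvDiffWitnessOut_coins_list_to_string_py.1 ∧ coins_list_to_string_py_alt (pvDiffWitness_coins_list_to_string_py) = pvDiffWitnessOut_coins_list_to_string_py.2 ∧ pvDiffWitnessOut_coins_list_to_string_py.1 ≠ pvDiffWitnessOut_coins_list_to_string_py.2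

-- ===== LEMMAS AND PROOFS =====

theorem pvPlural_eq (c : List Char) : pvPluralA c = pvPluralB c := by
  unfold pvPluralA pvPluralB
  have h : (PySem.List.pyGet? c (-1) = some 'y') ↔ (PySem.Chars.endswith c ['y'] = true) := by
    rw [PySem.List.pyGet?_neg_one]
    constructor
    · intro h
      rcases List.getLast?_eq_some_iff.mp h with ⟨l', rfl⟩
      simp [PySem.Chars.endswith, List.isSuffixOf_iff_suffix]
    · intro h
      have : ['y'] <:+ c := by
        simpa [PySem.Chars.endswith, List.isSuffixOf_iff_suffix] using h
      rcases this with ⟨t, rfl⟩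
      simp
  by_cases hy : PySem.List.pyGet? c (-1) = some 'y'
  · rw [if_pos hy, if_pos (h.mp hy)]
  · rw [if_neg hy, if_neg (fun hh => hy (h.mpr hh))]

theorem pvFold_eq (l : List (String × Int)) (res : List (List Char)) (w : Option (List Char)) :
    l.foldl pvStepA (res, w.getD []) =
      ((l.foldl pvStepB (res, w)).1, (l.foldl pvStepB (res, w)).2.getD []) := by
  induction l generalizing res w with
  | nil => simp
  | cons p t ih =>
    simp only [List.foldl_cons]
    by_cases h0 : p.2 = 0
    · rw [show pvStepA (res, w.getD []) p = (res, w.getD []) by simp [pvStepA, h0],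
        show pvStepB (res, w) p = (res, w) by simp [pvStepB, h0]]
      exact ih res w
    · by_cases h1 : p.2 > 1
      · rw [show pvStepA (res, w.getD []) p
            = (res ++ [PySem.Int.toChars p.2 ++ ' ' :: pvPluralA p.1.toList], pvPluralA p.1.toList) by
            simp [pvStepA, h0, h1],
          show pvStepB (res, w) p
            = (res ++ [PySem.Int.toChars p.2 ++ ' ' :: pvPluralB p.1.toList], some (pvPluralB p.1.toList)) by
            simp [pvStepB, h0, h1]]
        rw [pvPlural_eq]
        exact ih _ (some (pvPluralB p.1.toList))
      · by_cases h2 : p.2 > 0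
        · rw [show pvStepA (res, w.getD []) p
              = (res ++ [PySem.Int.toChars p.2 ++ ' ' :: p.1.toList], p.1.toList) by
              simp [pvStepA, h0, h1, h2],
            show pvStepB (res, w) p
              = (res ++ [PySem.Int.toChars p.2 ++ ' ' :: p.1.toList], some p.1.toList) by
              simp [pvStepB, h0, h1, h2]]
          exact ih _ (some p.1.toList)
        · rw [show pvStepA (res, w.getD []) p
              = (res ++ [PySem.Int.toChars p.2 ++ ' ' :: w.getD []], w.getD []) by
              simp [pvStepA, h0, h1, h2],
            show pvStepB (res, w) p
              = (res ++ [PySem.Int.toChars p.2 ++ ' ' :: w.getD []], w) by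
              simp [pvStepB, h0, h1, h2]]
          exact ih _ w

def pvParts (cur : List Char) : List (String × Int) → List (List Char)
  | [] => []
  | p :: t =>
    if p.2 = 0 then pvParts cur t
    else if p.2 > 1 then
      (PySem.Int.toChars p.2 ++ ' ' :: pvPluralA p.1.toList) :: pvParts (pvPluralA p.1.toList) t
    else if p.2 > 0 then
      (PySem.Int.toChars p.2 ++ ' ' :: p.1.toList) :: pvParts p.1.toList t
    else
      (PySem.Int.toChars p.2 ++ ' ' :: cur) :: pvParts cur t

theorem pvFoldA_parts (l : List (String × Int)) (res : List (List Char)) (w : List Char) :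
    (l.foldl pvStepA (res, w)).1 = res ++ pvParts w l := by
  induction l generalizing res w with
  | nil => simp [pvParts]
  | cons p t ih =>
    simp only [List.foldl_cons, pvParts]
    by_cases h0 : p.2 = 0
    · rw [show pvStepA (res, w) p = (res, w) by simp [pvStepA, h0], if_pos h0]; exact ih res w
    · rw [if_neg h0]
      by_cases h1 : p.2 > 1
      · rw [show pvStepA (res, w) p = (res ++ [PySem.Int.toChars p.2 ++ ' ' :: pvPluralA p.1.toList], pvPluralA p.1.toList) by simp [pvStepA, h0, h1], if_pos h1]
        rw [ih]; simp
      · rw [if_neg h1]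
        by_cases h2 : p.2 > 0
        · rw [show pvStepA (res, w) p = (res ++ [PySem.Int.toChars p.2 ++ ' ' :: p.1.toList], p.1.toList) by simp [pvStepA, h0, h1, h2], if_pos h2]
          rw [ih]; simp
        · rw [show pvStepA (res, w) p = (res ++ [PySem.Int.toChars p.2 ++ ' ' :: w], w) by simp [pvStepA, h0, h1, h2], if_neg h2]
          rw [ih]; simp

-- ',' never occurs in str(number)

theorem pvDigitChar_ne_comma (m : Nat) : Nat.digitChar m ≠ ',' := by
  by_cases h : m < 17
  · interval_cases m <;> decide
  · rw [Nat.digitChar]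
    rw [if_neg (by omega : ¬ m = 0), if_neg (by omega : ¬ m = 1), if_neg (by omega : ¬ m = 2),
      if_neg (by omega : ¬ m = 3), if_neg (by omega : ¬ m = 4), if_neg (by omega : ¬ m = 5),
      if_neg (by omega : ¬ m = 6), if_neg (by omega : ¬ m = 7), if_neg (by omega : ¬ m = 8),
      if_neg (by omega : ¬ m = 9), if_neg (by omega : ¬ m = 10), if_neg (by omega : ¬ m = 11),
      if_neg (by omega : ¬ m = 12), if_neg (by omega : ¬ m = 13), if_neg (by omega : ¬ m = 14),
      if_neg (by omega : ¬ m = 15)]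
    decide

theorem pvToDigitsCore_comma (b fuel : Nat) :
    ∀ (n : Nat) (ds : List Char), ',' ∈ Nat.toDigitsCore b fuel n ds → ',' ∈ ds := by
  induction fuel with
  | zero => intro n ds h; rw [Nat.toDigitsCore.eq_1] at h; exact h
  | succ fuel ih =>
    intro n ds h
    rw [Nat.toDigitsCore.eq_2] at h
    have hd : (n % b).digitChar ≠ ',' := pvDigitChar_ne_comma _
    by_cases hz : n / b = 0
    · rw [if_pos hz] at h
      rcases List.mem_cons.mp h with h | h
      · exact absurd h.symm hd
      · exact h
    · rw [if_neg hz] at h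
      rcases List.mem_cons.mp (ih _ _ h) with h' | h'
      · exact absurd h'.symm hd
      · exact h'

theorem pvComma_notin_toChars (n : Int) : ',' ∉ PySem.Int.toChars n := by
  unfold PySem.Int.toChars
  split
  · intro h
    rcases List.mem_cons.mp h with h | h
    · exact absurd h (by decide)
    · simpa using pvToDigitsCore_comma 10 _ _ _ h
  · intro h
    simpa using pvToDigitsCore_comma 10 _ _ _ h

-- ", " cannot cross an appended last char ≠ ' '

theorem pvInfix_concat (c : List Char) (x : Char) (hx : x ≠ ' ') :
    ([',', ' '] <:+: c ++ [x]) ↔ [',', ' '] <:+: c := by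
  constructor
  · rintro ⟨s, t, h⟩
    rcases t.eq_nil_or_concat with rfl | ⟨t', x', rfl⟩
    · exfalso
      have := congrArg List.getLast? h
      simp at this
      exact hx this.symm
    · have h' : (s ++ [',', ' '] ++ t') ++ [x'] = c ++ [x] := by
        simpa using h
      have := List.append_inj' h' (by rfl)
      exact this.1 ▸ ⟨s, t', rfl⟩
  · intro h
    exact h.trans ⟨[], [x], by simp⟩

theorem pvMem_concat (c : List Char) (x : Char) (hx : x ≠ ',') :
    (',' ∈ c ++ [x]) ↔ ',' ∈ c := by
  simp [List.mem_append]
  intro h; exact absurd h.symm hx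

-- ", " localizes to the word after the comma-free number and the space

theorem pvInfix_part (a w : List Char) (ha : ',' ∉ a) :
    ([',', ' '] <:+: a ++ ' ' :: w) ↔ [',', ' '] <:+: w := by
  induction a with
  | nil =>
    simp only [List.nil_append]
    rw [List.infix_cons_iff]
    constructor
    · rintro (h | h)
      · rcases h with ⟨t, ht⟩; simp at ht
      · exact h
    · intro h; exact Or.inr h
  | cons y a ih =>
    have hy : y ≠ ',' := fun h => ha (by simp [h])
    have ha' : ',' ∉ a := fun h => ha (by simp [h])
    simp only [List.cons_append]
    rw [List.infix_cons_iff]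
    constructor
    · rintro (h | h)
      · rcases h with ⟨t, ht⟩
        simp at ht
        exact absurd ht.1.symm hy
      · exact (ih ha').mp h
    · intro h; exact Or.inr ((ih ha').mpr h)

theorem pvMem_part (a w : List Char) (ha : ',' ∉ a) : (',' ∈ a ++ ' ' :: w) ↔ ',' ∈ w := by
  simp [List.mem_append, List.mem_cons]
  intro h; exact absurd h ha

theorem pvInfix_mem {w : List Char} (h : [',', ' '] <:+: w) : ',' ∈ w := by
  have : ',' ∈ ([',', ' '] : List Char) := by decide
  exact h.subset this

-- "the word w prints the commas of src and nothing more"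

def pvWF (src : String) (w : List Char) : Prop :=
  ([',', ' '] <:+: w ↔ [',', ' '] <:+: src.toList) ∧ (',' ∈ w ↔ ',' ∈ src.toList)

theorem pvWF_plural (c : String) : pvWF c (pvPluralA c.toList) := by
  unfold pvPluralA
  by_cases hy : PySem.List.pyGet? c.toList (-1) = some 'y'
  · rw [if_pos hy]
    rw [PySem.List.pyGet?_neg_one] at hy
    rcases List.getLast?_eq_some_iff.mp hy with ⟨l', hl⟩
    rw [PySem.List.slice_to_neg_one, hl, List.dropLast_concat]
    constructor
    · rw [hl]
      rw [show l' ++ ['i','e','s'] = ((l' ++ ['i']) ++ ['e']) ++ ['s'] by simp,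
        pvInfix_concat _ 's' (by decide), pvInfix_concat _ 'e' (by decide),
        pvInfix_concat _ 'i' (by decide), pvInfix_concat _ 'y' (by decide)]
    · rw [hl]
      rw [show l' ++ ['i','e','s'] = ((l' ++ ['i']) ++ ['e']) ++ ['s'] by simp,
        pvMem_concat _ 's' (by decide), pvMem_concat _ 'e' (by decide),
        pvMem_concat _ 'i' (by decide), pvMem_concat _ 'y' (by decide)]
  · rw [if_neg hy]
    exact ⟨pvInfix_concat _ 's' (by decide), pvMem_concat _ 's' (by decide)⟩

theorem pvWF_self (c : String) : pvWF c c.toList := ⟨Iff.rfl, Iff.rfl⟩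

theorem pvWF_empty : pvWF "" [] := by constructor <;> simp

-- a printed part = number ++ ' ' :: word with the word a pvWF-word of its source coin

def pvPartOk (src : String) (part : List Char) : Prop :=
  ∃ nch w, ',' ∉ nch ∧ part = nch ++ ' ' :: w ∧ pvWF src w

theorem pvPartOk_mk (src : String) (n : Int) (w : List Char) (h : pvWF src w) :
    pvPartOk src (PySem.Int.toChars n ++ ' ' :: w) :=
  ⟨_, _, pvComma_notin_toChars n, rfl, h⟩

theorem pvParts_ok (l : List (String × Int)) :
    ∀ (cur : String) (w : List Char), pvWF cur w →
      List.Forall₂ pvPartOk (pvWords cur l) (pvParts w l) := by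
  induction l with
  | nil => intro cur w _; exact List.Forall₂.nil
  | cons p t ih =>
    intro cur w hwf
    rw [pvWords.eq_2, pvParts.eq_2]
    by_cases h0 : p.2 = 0
    · rw [if_pos h0, if_pos h0]; exact ih cur w hwf
    · rw [if_neg h0, if_neg h0]
      by_cases h1 : p.2 > 1
      · rw [if_pos (by omega : p.2 ≥ 1), if_pos h1]
        exact List.Forall₂.cons (pvPartOk_mk _ _ _ (pvWF_plural p.1)) (ih _ _ (pvWF_plural p.1))
      · rw [if_neg h1]
        by_cases h2 : p.2 > 0
        · rw [if_pos (by omega : p.2 ≥ 1), if_pos h2]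
          exact List.Forall₂.cons (pvPartOk_mk _ _ _ (pvWF_self p.1)) (ih _ _ (pvWF_self p.1))
        · rw [if_neg (by omega : ¬ p.2 ≥ 1), if_neg h2]
          exact List.Forall₂.cons (pvPartOk_mk _ _ _ hwf) (ih _ _ hwf)

theorem pvJoin_cons_cons (sep : List Char) (a b : List Char) (t : List (List Char)) :
    PySem.Chars.join sep (a :: b :: t) = a ++ sep ++ PySem.Chars.join sep (b :: t) := by
  simp [PySem.Chars.join, List.intercalate, List.intersperse]

theorem pvJoin_singleton (sep a : List Char) : PySem.Chars.join sep [a] = a := by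
  simp [PySem.Chars.join, List.intercalate]

theorem pvJoin_concat (sep : List Char) :
    ∀ (ps : List (List Char)), ps ≠ [] → ∀ q,
      PySem.Chars.join sep (ps ++ [q]) = PySem.Chars.join sep ps ++ sep ++ q := by
  intro ps
  induction ps with
  | nil => intro h; exact absurd rfl h
  | cons a t ih =>
    intro _ q
    cases t with
    | nil => rw [List.cons_append, List.nil_append, pvJoin_cons_cons, pvJoin_singleton, pvJoin_singleton]
    | cons b t' =>
      have h1 : a :: b :: t' ++ [q] = a :: ((b :: t') ++ [q]) := by simp
      rw [h1]
      cases hbt : (b :: t') ++ [q] with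
      | nil => simp at hbt
      | cons u us =>
        rw [pvJoin_cons_cons, ← hbt, ih (by simp) q, pvJoin_cons_cons]
        simp

-- pvFindLast: none iff no occurrence

theorem pvFindLast_none (sep : List Char) (_hsep : sep ≠ []) :
    ∀ s : List Char, ¬ (sep <:+: s) → pvFindLast s sep = none := by
  intro s
  induction s with
  | nil => intro _; rfl
  | cons c t ih =>
    intro h
    have ht : ¬ (sep <:+: t) := fun hi => h (List.infix_cons_iff.mpr (Or.inr hi))
    rw [pvFindLast, ih ht]
    have hp : ¬ sep.isPrefixOf (c :: t) = true := by
      intro hp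
      exact h ((List.isPrefixOf_iff_prefix.mp hp).isInfix)
    simp [hp]

-- the last ", " of x ++ ", " ++ y is the shown one when y carries none

theorem pvFindLast_sep (y : List Char) (hy : ¬ ([',', ' '] <:+: y)) :
    ∀ x : List Char, pvFindLast (x ++ ',' :: ' ' :: y) [',', ' '] = some x.length := by
  intro x
  induction x with
  | nil =>
    have hsy : ¬ ([',', ' '] <:+: (' ' :: y)) := by
      intro h
      rcases List.infix_cons_iff.mp h with h | h
      · rcases h with ⟨t, ht⟩; simp at ht
      · exact hy h
    rw [List.nil_append, pvFindLast, pvFindLast_none [',', ' '] (by simp) _ hsy]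
    simp [List.isPrefixOf]
  | cons c x ih =>
    rw [List.cons_append, pvFindLast, ih]
    simp

theorem pvRsplit_none (s : List Char) (h : ¬ ([',', ' '] <:+: s)) :
    pvRsplitOne s [',', ' '] = [s] := by
  rw [pvRsplitOne, pvFindLast_none [',', ' '] (by simp) s h]

theorem pvRsplit_sep (x y : List Char) (hy : ¬ ([',', ' '] <:+: y)) :
    pvRsplitOne (x ++ ',' :: ' ' :: y) [',', ' '] = [x, y] := by
  rw [pvRsplitOne, pvFindLast_sep y hy x]
  have h1 : (x ++ ',' :: ' ' :: y).take x.length = x := by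
    rw [show x ++ ',' :: ' ' :: y = x ++ (',' :: ' ' :: y) from rfl, List.take_left]
  have h2 : (x ++ ',' :: ' ' :: y).drop (x.length + 2) = y := by
    rw [show x ++ ',' :: ' ' :: y = (x ++ [',', ' ']) ++ y by simp]
    rw [show x.length + 2 = (x ++ [',', ' ']).length by simp]
    exact List.drop_left
  simp only [List.length_cons, List.length_nil, Nat.zero_add]
  rw [show x.length + (0 + 1 + 1) = x.length + 2 by omega] 
  rw [h1, h2]

-- replace(s, ",", "") is filtering the commas out

theorem pvReplaceGo_filter :
    ∀ (fuel : Nat) (l acc : List Char), l.length ≤ fuel →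
      PySem.Chars.replace.go [','] [] fuel l acc
        = acc.reverse ++ l.filter (fun c => !(c == ',')) := by
  intro fuel
  induction fuel with
  | zero =>
    intro l acc h
    have : l = [] := List.length_eq_zero_iff.mp (Nat.le_zero.mp h)
    subst this
    simp [PySem.Chars.replace.go]
  | succ fuel ih =>
    intro l acc h
    cases l with
    | nil => simp [PySem.Chars.replace.go]
    | cons c t =>
      rw [PySem.Chars.replace.go]
      by_cases hc : c = ','
      · subst hc
        rw [if_pos (by simp [List.isPrefixOf])]
        rw [show List.drop [','].length (',' :: t) = t from rfl, List.reverse_nil, List.nil_append]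
        rw [ih t acc (by simpa using h)]
        simp
      · rw [if_neg (by simp only [List.isPrefixOf, Bool.and_true, beq_iff_eq]; exact fun h => hc h.symm)]
        rw [ih t (c :: acc) (by simpa using h)]
        simp [hc]

theorem pvReplace_filter (s : List Char) :
    PySem.Chars.replace s [','] [] = s.filter (fun c => !(c == ',')) := by
  rw [PySem.Chars.replace]
  rw [if_neg (by simp)]
  simpa using pvReplaceGo_filter s.length s [] (le_refl _)

-- Forall₂ transfers to the last elements
theorem pvForall₂_last {R : String → List Char → Prop} :
    ∀ {l1 : List String} {l2 : List (List Char)}, List.Forall₂ R l1 l2 → l2 ≠ [] →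
      R (l1.getLastD "") (l2.getLastD []) := by
  intro l1 l2 h
  induction h with
  | nil => intro h; exact absurd rfl h
  | cons hR hT ih =>
    intro _
    rename_i a b t1 t2
    cases hT with
    | nil => exact hR
    | cons hR' hT' =>
      have := ih (by simp)
      simpa [List.getLastD_cons] using this

theorem pvPartOk_no_sep {src : String} {part : List Char} (h : pvPartOk src part)
    (hs : ¬ ([',', ' '] <:+: src.toList)) : ¬ ([',', ' '] <:+: part) := by
  rcases h with ⟨nch, w, hn, rfl, hwf⟩
  rw [pvInfix_part nch w hn, hwf.1]
  exact hs

theorem pvPartOk_no_comma {src : String} {part : List Char} (h : pvPartOk src part)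
    (hs : ',' ∉ src.toList) : ',' ∉ part := by
  rcases h with ⟨nch, w, hn, rfl, hwf⟩
  rw [pvMem_part nch w hn, hwf.2]
  exact hs

-- A's and B's assemblies of the parts list (the ports are these up to zeta reduction)
def pvAssembleA (parts : List (List Char)) : String :=
  String.ofList (if parts.length = 2 then
      PySem.Chars.replace (PySem.Chars.join [',', ' ', 'a', 'n', 'd', ' ']
        (pvRsplitOne (PySem.Chars.join [',', ' '] parts) [',', ' '])) [','] []
    else PySem.Chars.join [',', ' ', 'a', 'n', 'd', ' ']
        (pvRsplitOne (PySem.Chars.join [',', ' '] parts) [',', ' ']))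

def pvAssembleB (parts : List (List Char)) : String :=
  if parts.length = 0 then String.ofList []
  else if parts.length = 1 then String.ofList (parts.getD 0 [])
  else if parts.length = 2 then
    String.ofList (parts.getD 0 [] ++ [' ', 'a', 'n', 'd', ' '] ++ parts.getD 1 [])
  else
    String.ofList (PySem.Chars.join [',', ' '] parts.dropLast ++
      [',', ' ', 'a', 'n', 'd', ' '] ++ parts.getLastD [])

theorem pvDropLast_concat_getLastD {α : Type} (l : List α) (d : α) (h : l ≠ []) :
    l.dropLast ++ [l.getLastD d] = l := by
  cases l with
  | nil => exact absurd rfl h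
  | cons a t =>
    have h1 := List.dropLast_append_getLast (l := a :: t) (by simp)
    rwa [List.getLast_eq_getLastD, ← List.getLastD_cons] at h1

theorem pvFilter_comma_eq_self (p : List Char) (h : ',' ∉ p) :
    p.filter (fun c => !(c == ',')) = p := by
  apply List.filter_eq_self.mpr
  intro a ha
  simp only [Bool.not_eq_true', beq_eq_false_iff_ne]
  intro he
  exact h (he ▸ ha)

-- ===== VERDICT (by name: the statement is the Claim_ definition above) =====
theorem coins_list_to_string_py_spec : Claim_unchanged_coins_list_to_string_py := by
  intro l hDom hPre
  unfold Spec_coins_list_to_string_py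
  intro hnD
  have hA1 : (l.foldl pvStepA ([], [])).1 = pvParts [] l := by
    simpa using pvFoldA_parts l [] []
  have hBA := pvFold_eq l [] none
  have hB1 : (l.foldl pvStepB ([], none)).1 = pvParts [] l := by
    rw [← hA1]
    rw [show (([], []) : List (List Char) × List Char) = ([], (none : Option (List Char)).getD []) from rfl, hBA]
  have hok : List.Forall₂ pvPartOk (pvWords "" l) (pvParts [] l) :=
    pvParts_ok l "" [] pvWF_empty
  have hlen := List.Forall₂.length_eq hok
  have heqA : coins_list_to_string_py l = pvAssembleA (pvParts [] l) := by
    rw [show coins_list_to_string_py l = pvAssembleA ((l.foldl pvStepA ([], [])).1) from rfl, hA1]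
  have heqB : coins_list_to_string_py_alt l = pvAssembleB (pvParts [] l) := by
    rw [show coins_list_to_string_py_alt l = pvAssembleB ((l.foldl pvStepB ([], none)).1) from rfl, hB1]
  rw [heqA, heqB]
  unfold D_coins_list_to_string_py at hnD
  cases hp : pvParts [] l with
  | nil => decide
  | cons p0 t0 =>
    rw [hp] at hok hlen
    cases t0 with
    | nil =>
      rcases List.forall₂_cons_right_iff.mp hok with ⟨s0, ws', hp0, hws', hwseq⟩
      have hwsnil : ws' = [] := by cases hws'; rfl
      rw [hwsnil] at hwseq
      have hs0 : ¬ ([',', ' '] <:+: s0.toList) := by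
        intro hinf
        apply hnD
        rw [hwseq]
        show PySem.Str.isIn ", " s0 = true
        rw [PySem.Str.isIn_iff_infix]; exact hinf
      have hnosep := pvPartOk_no_sep hp0 hs0
      unfold pvAssembleA pvAssembleB
      rw [pvJoin_singleton, pvRsplit_none _ hnosep, pvJoin_singleton]
      simp
    | cons p1 t1 =>
      cases t1 with
      | nil =>
        rcases List.forall₂_cons_right_iff.mp hok with ⟨s0, ws1, hp0, hok1, hwseq⟩
        rcases List.forall₂_cons_right_iff.mp hok1 with ⟨s1, ws2, hp1, hok2, hws1eq⟩
        have hwsnil : ws2 = [] := by cases hok2; rfl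
        rw [hwsnil] at hws1eq
        rw [hws1eq] at hwseq
        have hs0 : ',' ∉ s0.toList := by
          intro hmem
          apply hnD
          rw [hwseq]
          show (PySem.Str.isIn "," s0 || PySem.Str.isIn "," s1) = true
          rw [Bool.or_eq_true]
          exact Or.inl (by rw [PySem.Str.isIn_iff_infix]; exact (List.singleton_infix_iff ',' s0.toList).mpr hmem)
        have hs1 : ',' ∉ s1.toList := by
          intro hmem
          apply hnD
          rw [hwseq]
          show (PySem.Str.isIn "," s0 || PySem.Str.isIn "," s1) = true
          rw [Bool.or_eq_true]
          exact Or.inr (by rw [PySem.Str.isIn_iff_infix]; exact (List.singleton_infix_iff ',' s1.toList).mpr hmem)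
        have hc0 := pvPartOk_no_comma hp0 hs0
        have hc1 := pvPartOk_no_comma hp1 hs1
        have hnosep1 : ¬ ([',', ' '] <:+: p1) := fun h => hc1 (pvInfix_mem h)
        unfold pvAssembleA pvAssembleB
        rw [pvJoin_cons_cons, pvJoin_singleton]
        rw [show p0 ++ [',', ' '] ++ p1 = p0 ++ ',' :: ' ' :: p1 by simp]
        rw [pvRsplit_sep p0 p1 hnosep1]
        rw [pvJoin_cons_cons, pvJoin_singleton]
        rw [show ([p0, p1] : List (List Char)).length = 2 from rfl, if_pos rfl]
        rw [show p0 ++ [',', ' ', 'a', 'n', 'd', ' '] ++ p1 = p0 ++ ([',', ' ', 'a', 'n', 'd', ' '] ++ p1) by simp]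
        rw [pvReplace_filter, List.filter_append, List.filter_append,
          pvFilter_comma_eq_self p0 hc0, pvFilter_comma_eq_self p1 hc1]
        simp
      | cons p2 rest =>
        rcases List.forall₂_cons_right_iff.mp hok with ⟨s0, w1, hq0, hok1, hwseq⟩
        rcases List.forall₂_cons_right_iff.mp hok1 with ⟨s1, w2, hq1, hok2, hw1⟩
        rcases List.forall₂_cons_right_iff.mp hok2 with ⟨s2, w3, hq2, hok3, hw2⟩
        rw [hw2] at hw1
        rw [hw1] at hwseq
        have hlast := pvForall₂_last hok (by simp)
        have hs : ¬ ([',', ' '] <:+: ((pvWords "" l).getLastD "").toList) := by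
          intro hinf
          apply hnD
          rw [hwseq]
          rw [hwseq] at hinf
          show PySem.Str.isIn ", " ((s0 :: s1 :: s2 :: w3).getLastD "") = true
          rw [PySem.Str.isIn_iff_infix]
          exact hinf
        have hy := pvPartOk_no_sep hlast hs
        unfold pvAssembleA pvAssembleB
        rw [if_neg (by simp), if_neg (by simp), if_neg (by simp), if_neg (by simp)]
        have hne : (p0 :: p1 :: p2 :: rest).dropLast ≠ [] := by
          simp [List.dropLast]
        have hsplit := pvDropLast_concat_getLastD (p0 :: p1 :: p2 :: rest) [] (by simp)
        conv_lhs => rw [← hsplit]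
        rw [pvJoin_concat _ _ hne]
        rw [show PySem.Chars.join [',', ' '] (p0 :: p1 :: p2 :: rest).dropLast ++ [',', ' ']
              ++ (p0 :: p1 :: p2 :: rest).getLastD []
            = PySem.Chars.join [',', ' '] (p0 :: p1 :: p2 :: rest).dropLast
              ++ ',' :: ' ' :: (p0 :: p1 :: p2 :: rest).getLastD [] by simp]
        rw [pvRsplit_sep _ _ hy]
        rw [pvJoin_cons_cons, pvJoin_singleton]

theorem coins_list_to_string_py_changed : Claim_changed_coins_list_to_string_py := by
  unfold Claim_changed_coins_list_to_string_py; decide
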